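-- pv_equiv track=rewrite | github.com/matthewmagardino/hangman-py | hangman.py | makeBlanks
-- ===== SOURCE A (Python) =====
-- def listToString(l):
--     return "".join(l);
--
-- def makeBlanks(word):
--     length = len(word);
--     s =[];
--     for i in range(0, length * 2, 1):
--         if (i % 2 == 0):
--             s.append('_');
--         else:
--             s.append(' ');
--     spaces = listToString(s);
--     return spaces;
-- ===== SOURCE B (Python) =====
-- def makeBlanks(word):
--     return "_ " * len(word)
-- ===== Notes on version B (the rewrite author's own statement) =====
-- stated objective: idiomatic
-- what changed: Replaced the per-index loop with a parity test, list append and join by a single closed-form string repetition "_ " * len(word).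
import Mathlib
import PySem

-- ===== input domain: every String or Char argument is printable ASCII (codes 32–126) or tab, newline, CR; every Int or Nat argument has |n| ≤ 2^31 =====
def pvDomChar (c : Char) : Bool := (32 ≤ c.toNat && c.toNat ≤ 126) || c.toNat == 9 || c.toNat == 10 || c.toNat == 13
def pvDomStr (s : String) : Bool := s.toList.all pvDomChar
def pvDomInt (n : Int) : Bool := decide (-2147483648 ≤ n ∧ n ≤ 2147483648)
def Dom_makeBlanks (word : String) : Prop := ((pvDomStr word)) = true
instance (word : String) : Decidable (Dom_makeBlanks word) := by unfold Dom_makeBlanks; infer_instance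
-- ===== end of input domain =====

-- B replaces A's per-index parity loop + join by one closed-form string repetition "_ " * len(word).

-- ===== PORT A =====
-- helper: listToString(l) = "".join(l)
def listToString (l : List String) : String := PySem.Str.join "" l

def makeBlanks (word : String) : String :=
  let length : Int := PySem.Str.len word
  let s : List String :=
    (PySem.List.pyRange 0 (length * 2) 1).foldl
      (fun acc i => if i % 2 == 0 then acc ++ ["_"] else acc ++ [" "]) []
  let spaces := listToString s
  spaces

-- ===== PORT B =====
-- "_ " * len(word)  (string repetition, ported via pyRepeat on the code points)
def makeBlanks_alt (word : String) : String :=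
  String.ofList (PySem.List.pyRepeat "_ ".toList (PySem.Str.len word))

-- ===== PRECONDITION & SPEC =====
def Spec_makeBlanks (word : String) (out : String) : Prop := out = makeBlanks_alt word
instance (word : String) (out : String) : Decidable (Spec_makeBlanks word out) := by unfold Spec_makeBlanks; infer_instance

-- ===== CLAIM (what is proved, stated in full; the proofs are below) =====
def Claim_equal_makeBlanks : Prop := ∀ (word : String), Dom_makeBlanks word → Spec_makeBlanks word (makeBlanks word)

-- ===== LEMMAS AND PROOFS =====

lemma intercalate_nil_eq_flatten {α : Type} : ∀ (l : List (List α)), ([] : List α).intercalate l = l.flatten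
  | [] => by simp [List.intercalate]
  | [a] => by simp [List.intercalate]
  | a :: b :: l => by
    have ih := intercalate_nil_eq_flatten (b :: l)
    simp [List.intercalate] at ih ⊢
    simpa using ih

lemma makeBlanks_loop (n : Nat) :
    (PySem.List.pyRange 0 ((n : Int) * 2) 1).foldl
      (fun acc i => if i % 2 == 0 then acc ++ ["_"] else acc ++ [" "]) ([] : List String)
      = (List.replicate n ["_", " "]).flatten := by
  induction n with
  | zero => simp [PySem.List.pyRange]
  | succ m ih =>
    have key : PySem.List.pyRange 0 (((m + 1 : Nat) : Int) * 2) 1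
        = PySem.List.pyRange 0 ((m : Int) * 2) 1 ++ [(m : Int) * 2, (m : Int) * 2 + 1] := by
      have h1 : ((m + 1 : Nat) : Int) * 2 = ((m : Int) * 2 + 1) + 1 := by push_cast; ring
      rw [h1, PySem.List.pyRange_one_succ_right (by positivity),
          PySem.List.pyRange_one_succ_right (by positivity)]
      simp
    rw [key, List.foldl_append, ih]
    simp [List.replicate_succ']

lemma flatten_map_toList (n : Nat) :
    (((List.replicate n ["_", " "]).flatten).map String.toList).flatten
      = (List.replicate n ("_ ".toList)).flatten := by
  induction n with
  | zero => simp
  | succ m ih =>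
    rw [List.replicate_succ, List.replicate_succ, List.flatten_cons, List.flatten_cons,
        List.map_append, List.flatten_append, ih]
    rfl

theorem makeBlanks_spec : Claim_equal_makeBlanks := by
  intro word _
  unfold Spec_makeBlanks makeBlanks makeBlanks_alt
  simp only [PySem.Str.len, makeBlanks_loop, listToString, PySem.Str.join,
    PySem.Chars.join, PySem.List.pyRepeat, Int.toNat_natCast]
  congr 1
  rw [show String.toList "" = [] from rfl, intercalate_nil_eq_flatten]
  exact flatten_map_toList word.toList.length
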